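-- pv_equiv track=rewrite | github.com/Mortal/30game | descriptions.py | describe_choices_help
-- ===== SOURCE A (Python) =====
-- def describe_dice(sides, count, sum):
--     if count == 1:
--         return 'a %d' % (sum + 1)
--     elif sum == 0:
--         return '%d 1s' % count
--     elif sum == count * (sides - 1):
--         return '%d %ds' % (count, sides)
--     elif sum == 1:
--         return describe_dice(sides, count - 1, 0) + ' and a 2'
--     #elif sum == count * (sides - 1) - 1:
--     #    if count == 2:
--     #        return 'a %d and a %d' % (sides, sides - 1)
--     #    else:
--     #        return '%d %ds and a %d' % (count - 1, sides, sides - 1)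
--     else:
--         return '%d dice making %d' % (count, sum + count)
--
-- def describe_choices_help(sides, n, ss):
--     if n == 1:
--         a_ss = ['a %s' % (s+n) for s in sorted(ss)]
--         if len(ss) == 1:
--             return a_ss[0]
--         else:
--             return '%s or %s' % (', '.join(a_ss[:-1]), a_ss[-1])
--     start = {min(ss)} | {s for s in ss if s - 1 not in ss}
--     stop = {max(ss)} | {s for s in ss if s + 1 not in ss}
--     descs = []
--     for a, b in zip(sorted(start), sorted(stop)):
--         if a == b:
--             descs.append(describe_dice(sides, n, a))
--         elif a == 0:
--             descs.append('%d dice making at most %d' % (n, b + n))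
--         elif b == n * (sides - 1):
--             descs.append('%d dice making at least %d' % (n, a + n))
--         else:
--             descs.append('%d dice making between %d and %d' %
--                          (n, a + n, b + n))
--     return ' or '.join(descs)
-- ===== SOURCE B (Python) =====
-- def describe_dice(sides, count, sum):
--     if count == 1:
--         return 'a %d' % (sum + 1)
--     elif sum == 0:
--         return '%d 1s' % count
--     elif sum == count * (sides - 1):
--         return '%d %ds' % (count, sides)
--     elif sum == 1:
--         return describe_dice(sides, count - 1, 0) + ' and a 2'
--     else:
--         return '%d dice making %d' % (count, sum + count)
--
-- def _runs(vals):
--     # group a strictly increasing list into maximal runs of consecutive values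
--     if not vals:
--         return []
--     runs = []
--     start = prev = vals[0]
--     for v in vals[1:]:
--         if v != prev + 1:
--             runs.append((start, prev))
--             start = v
--         prev = v
--     runs.append((start, prev))
--     return runs
--
-- def _fmt(sides, n, a, b):
--     if a == b:
--         return describe_dice(sides, n, a)
--     elif a == 0:
--         return '%d dice making at most %d' % (n, b + n)
--     elif b == n * (sides - 1):
--         return '%d dice making at least %d' % (n, a + n)
--     else:
--         return '%d dice making between %d and %d' % (n, a + n, b + n)
--
-- def describe_choices_help(sides, n, ss):
--     if n == 1:
--         a_ss = ['a %s' % (s + n) for s in sorted(ss)]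
--         if len(ss) == 1:
--             return a_ss[0]
--         else:
--             return '%s or %s' % (', '.join(a_ss[:-1]), a_ss[-1])
--     vals = sorted(set(ss))
--     return ' or '.join(_fmt(sides, n, a, b) for a, b in _runs(vals))
-- ===== Notes on version B (the rewrite author's own statement) =====
-- stated objective: alternative
-- what changed: For n!=1, B replaces A's two set comprehensions (run starts / run stops), two sorts and a zip by one sort of set(ss) followed by a single linear grouping scan that collects maximal consecutive runs; the per-run formatting branch is unchanged.
import Mathlib
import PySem

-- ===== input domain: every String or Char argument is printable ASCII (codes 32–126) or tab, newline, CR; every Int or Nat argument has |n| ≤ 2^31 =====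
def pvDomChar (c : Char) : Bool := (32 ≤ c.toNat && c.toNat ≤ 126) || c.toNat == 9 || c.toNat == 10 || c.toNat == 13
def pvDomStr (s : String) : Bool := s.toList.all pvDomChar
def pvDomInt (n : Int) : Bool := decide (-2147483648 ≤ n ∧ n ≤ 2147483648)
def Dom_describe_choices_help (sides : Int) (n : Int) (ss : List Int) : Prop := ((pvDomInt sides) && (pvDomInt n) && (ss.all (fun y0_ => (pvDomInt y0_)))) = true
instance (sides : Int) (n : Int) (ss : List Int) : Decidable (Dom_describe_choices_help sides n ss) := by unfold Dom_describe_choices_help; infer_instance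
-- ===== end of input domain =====

-- B replaces the set-comprehension start/stop construction by one grouping scan over sorted(set(ss)); equal cost, plainer structure.

-- ===== PORT A =====
-- shared module helper, literal port (depth-1 recursion; measure: the sum==1 branch recurses with sum 0)
def describe_dice (sides : Int) (count : Int) (sum : Int) : String :=
  if count = 1 then "a " ++ PySem.Int.toStr (sum + 1)
  else if sum = 0 then PySem.Int.toStr count ++ " 1s"
  else if sum = count * (sides - 1) then PySem.Int.toStr count ++ " " ++ PySem.Int.toStr sides ++ "s"
  else if sum = 1 then describe_dice sides (count - 1) 0 ++ " and a 2"
  else PySem.Int.toStr count ++ " dice making " ++ PySem.Int.toStr (sum + count)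
termination_by (if sum = 1 then 1 else 0 : Nat)
decreasing_by simp_all

def describe_choices_help (sides : Int) (n : Int) (ss : List Int) : String :=
  if n = 1 then
    let a_ss := (PySem.List.sorted ss (fun x => x) false).map (fun s => "a " ++ PySem.Int.toStr (s + n))
    if ss.length = 1 then (PySem.List.pyGet? a_ss 0).getD ""
    else PySem.Str.join ", " (PySem.List.slice a_ss none (some (-1))) ++ " or " ++ (PySem.List.pyGet? a_ss (-1)).getD ""
  else
    let start : PySem.Set Int := PySem.Set.union (PySem.Set.ofList [(PySem.List.min? ss (fun x => x)).getD 0]) (PySem.Set.ofList (ss.filter (fun s => !decide ((s - 1) ∈ ss))))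
    let stop : PySem.Set Int := PySem.Set.union (PySem.Set.ofList [(PySem.List.max? ss (fun x => x)).getD 0]) (PySem.Set.ofList (ss.filter (fun s => !decide ((s + 1) ∈ ss))))
    let descs : List String :=
      ((PySem.List.sorted start (fun x => x) false).zip (PySem.List.sorted stop (fun x => x) false)).foldl
        (fun acc p =>
          acc ++ [if p.1 = p.2 then describe_dice sides n p.1
                  else if p.1 = 0 then PySem.Int.toStr n ++ " dice making at most " ++ PySem.Int.toStr (p.2 + n)
                  else if p.2 = n * (sides - 1) then PySem.Int.toStr n ++ " dice making at least " ++ PySem.Int.toStr (p.1 + n)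
                  else PySem.Int.toStr n ++ " dice making between " ++ PySem.Int.toStr (p.1 + n) ++ " and " ++ PySem.Int.toStr (p.2 + n)]) []
    PySem.Str.join " or " descs

-- ===== PORT B =====
-- group a strictly increasing list into maximal runs of consecutive values (one linear scan)
def pvRuns (vals : List Int) : List (Int × Int) :=
  match vals with
  | [] => []
  | v0 :: rest =>
    let st := rest.foldl
      (fun (acc : List (Int × Int) × Int × Int) v =>
        if v ≠ acc.2.2 + 1 then (acc.1 ++ [(acc.2.1, acc.2.2)], v, v) else (acc.1, acc.2.1, v))
      ([], v0, v0)
    st.1 ++ [(st.2.1, st.2.2)]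

def pvFmt (sides : Int) (n : Int) (a : Int) (b : Int) : String :=
  if a = b then describe_dice sides n a
  else if a = 0 then PySem.Int.toStr n ++ " dice making at most " ++ PySem.Int.toStr (b + n)
  else if b = n * (sides - 1) then PySem.Int.toStr n ++ " dice making at least " ++ PySem.Int.toStr (a + n)
  else PySem.Int.toStr n ++ " dice making between " ++ PySem.Int.toStr (a + n) ++ " and " ++ PySem.Int.toStr (b + n)

def describe_choices_help_alt (sides : Int) (n : Int) (ss : List Int) : String :=
  if n = 1 then
    let a_ss := (PySem.List.sorted ss (fun x => x) false).map (fun s => "a " ++ PySem.Int.toStr (s + n))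
    if ss.length = 1 then (PySem.List.pyGet? a_ss 0).getD ""
    else PySem.Str.join ", " (PySem.List.slice a_ss none (some (-1))) ++ " or " ++ (PySem.List.pyGet? a_ss (-1)).getD ""
  else
    let vals := PySem.List.sorted (PySem.Set.ofList ss) (fun x => x) false
    PySem.Str.join " or " ((pvRuns vals).map (fun p => pvFmt sides n p.1 p.2))

-- ===== PRECONDITION & SPEC =====
-- Pre_ excludes only empty ss, on which A raises (ValueError from min for n != 1, IndexError from a_ss[-1] for n == 1).
def Pre_describe_choices_help (sides : Int) (n : Int) (ss : List Int) : Prop := ss ≠ []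
instance (sides : Int) (n : Int) (ss : List Int) : Decidable (Pre_describe_choices_help sides n ss) := by unfold Pre_describe_choices_help; infer_instance
def pvWitness_describe_choices_help : Int × Int × List Int := (6, 2, [0, 1, 3])

def Spec_describe_choices_help (sides : Int) (n : Int) (ss : List Int) (out : String) : Prop := out = describe_choices_help_alt sides n ss
instance (sides : Int) (n : Int) (ss : List Int) (out : String) : Decidable (Spec_describe_choices_help sides n ss out) := by unfold Spec_describe_choices_help; infer_instance

-- ===== CLAIM (what is proved, stated in full; the proofs are below) =====
def Claim_equal_describe_choices_help : Prop := ∀ (sides : Int) (n : Int) (ss : List Int), Dom_describe_choices_help sides n ss → Pre_describe_choices_help sides n ss → Spec_describe_choices_help sides n ss (describe_choices_help sides n ss)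

-- ===== LEMMAS AND PROOFS =====

-- run starts strictly after the head: elements y of the tail with y ≠ prev + 1
def chainStarts (prev : Int) : List Int → List Int
  | [] => []
  | y :: t => (if y = prev + 1 then [] else [y]) ++ chainStarts y t

-- run stops: prev is a stop unless the next element is prev + 1; the last element always stops
def chainStops (prev : Int) : List Int → List Int
  | [] => [prev]
  | y :: t => (if y = prev + 1 then [] else [prev]) ++ chainStops y t

-- recursive form of the grouping scan, for the proofs
def pvRunsFrom (start : Int) (prev : Int) (rest : List Int) : List (Int × Int) :=
  match rest with
  | [] => [(start, prev)]
  | v :: tail => if v ≠ prev + 1 then [(start, prev)] ++ pvRunsFrom v v tail else pvRunsFrom start v tail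

theorem foldl_runs_eq_runsFrom (t : List Int) : ∀ (acc : List (Int × Int)) (start prev : Int),
    (t.foldl
      (fun (acc : List (Int × Int) × Int × Int) v =>
        if v ≠ acc.2.2 + 1 then (acc.1 ++ [(acc.2.1, acc.2.2)], v, v) else (acc.1, acc.2.1, v))
      (acc, start, prev)).1
    ++ [((t.foldl
      (fun (acc : List (Int × Int) × Int × Int) v =>
        if v ≠ acc.2.2 + 1 then (acc.1 ++ [(acc.2.1, acc.2.2)], v, v) else (acc.1, acc.2.1, v))
      (acc, start, prev)).2.1,
        (t.foldl
      (fun (acc : List (Int × Int) × Int × Int) v =>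
        if v ≠ acc.2.2 + 1 then (acc.1 ++ [(acc.2.1, acc.2.2)], v, v) else (acc.1, acc.2.1, v))
      (acc, start, prev)).2.2)]
    = acc ++ pvRunsFrom start prev t := by
  induction t with
  | nil => intro acc start prev; rfl
  | cons y t ih =>
    intro acc start prev
    simp only [List.foldl_cons]
    by_cases h : y = prev + 1
    · rw [if_neg (by simp [h]), ih]
      simp only [pvRunsFrom]
      rw [if_neg (by simp [h])]
    · rw [if_pos h, ih]
      simp only [pvRunsFrom]
      rw [if_pos h]
      simp [List.append_assoc]

theorem pvRuns_cons (x : Int) (t : List Int) : pvRuns (x :: t) = pvRunsFrom x x t := by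
  simpa [pvRuns] using foldl_runs_eq_runsFrom t [] x x

theorem zip_chain_eq_runsFrom (t : List Int) : ∀ (start prev : Int),
    (start :: chainStarts prev t).zip (chainStops prev t) = pvRunsFrom start prev t := by
  induction t with
  | nil => intro start prev; simp [chainStarts, chainStops, pvRunsFrom]
  | cons y t ih =>
    intro start prev
    by_cases h : y = prev + 1 <;> simp [chainStarts, chainStops, pvRunsFrom, h, ih]

theorem filter_start_eq_chainStarts (M : List Int) (L : List Int) : ∀ (prev : Int),
    L.Pairwise (· < ·) → (∀ z ∈ L, prev < z) →
    (∀ z, prev ≤ z → (z ∈ M ↔ z ∈ prev :: L)) →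
    L.filter (fun s => !decide ((s - 1) ∈ M)) = chainStarts prev L := by
  induction L with
  | nil => intro prev _ _ _; rfl
  | cons y t ih =>
    intro prev hp hb hM
    have hpy : prev < y := hb y (by simp)
    have hty : ∀ z ∈ t, y < z := fun z hz => (List.pairwise_cons.mp hp).1 z hz
    have hflag : (y - 1 ∈ M) ↔ y = prev + 1 := by
      rw [hM (y - 1) (by omega)]
      simp only [List.mem_cons]
      constructor
      · rintro (h | h | h)
        · omega
        · omega
        · exact absurd (hty _ h) (by omega)
      · intro h; left; omega
    have hM' : ∀ z, y ≤ z → (z ∈ M ↔ z ∈ y :: t) := by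
      intro z hz
      rw [hM z (by omega)]
      simp only [List.mem_cons]
      constructor
      · rintro (h | h)
        · omega
        · exact h
      · intro h; right; exact h
    have ht := ih y (List.pairwise_cons.mp hp).2 hty hM'
    by_cases h : y = prev + 1
    · have hy1 : (y - 1 ∈ M) := hflag.mpr h
      have hred : (y :: t).filter (fun s => !decide ((s - 1) ∈ M))
          = t.filter (fun s => !decide ((s - 1) ∈ M)) := by
        rw [List.filter_cons]; simp [hy1]
      rw [hred, ht]; simp [chainStarts, h]
    · have hy1 : ¬ (y - 1 ∈ M) := fun hc => h (hflag.mp hc)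
      have hred : (y :: t).filter (fun s => !decide ((s - 1) ∈ M))
          = y :: t.filter (fun s => !decide ((s - 1) ∈ M)) := by
        rw [List.filter_cons]; simp [hy1]
      rw [hred, ht]; simp [chainStarts, h]

theorem filter_stop_eq_chainStops (M : List Int) (L : List Int) : ∀ (prev : Int),
    L.Pairwise (· < ·) → (∀ z ∈ L, prev < z) →
    (∀ z, prev ≤ z → (z ∈ M ↔ z ∈ prev :: L)) →
    (prev :: L).filter (fun s => !decide ((s + 1) ∈ M)) = chainStops prev L := by
  induction L with
  | nil =>
    intro prev _ _ hM
    have hy1 : ¬ (prev + 1 ∈ M) := by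
      intro hc
      have := (hM (prev + 1) (by omega)).mp hc
      simp only [List.mem_cons, List.not_mem_nil, or_false] at this
      omega
    rw [List.filter_cons]; simp [hy1, chainStops]
  | cons y t ih =>
    intro prev hp hb hM
    have hpy : prev < y := hb y (by simp)
    have hty : ∀ z ∈ t, y < z := fun z hz => (List.pairwise_cons.mp hp).1 z hz
    have hflag : (prev + 1 ∈ M) ↔ y = prev + 1 := by
      rw [hM (prev + 1) (by omega)]
      simp only [List.mem_cons]
      constructor
      · rintro (h | h | h)
        · omega
        · omega
        · by_cases hy : y = prev + 1
          · exact hy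
          · exact absurd (hty _ h) (by omega)
      · intro h; right; left; omega
    have hM' : ∀ z, y ≤ z → (z ∈ M ↔ z ∈ y :: t) := by
      intro z hz
      rw [hM z (by omega)]
      simp only [List.mem_cons]
      constructor
      · rintro (h | h)
        · omega
        · exact h
      · intro h; right; exact h
    have ht := ih y (List.pairwise_cons.mp hp).2 hty hM'
    by_cases h : y = prev + 1
    · have hy1 : (prev + 1 ∈ M) := hflag.mpr h
      have hred : (prev :: y :: t).filter (fun s => !decide ((s + 1) ∈ M))
          = (y :: t).filter (fun s => !decide ((s + 1) ∈ M)) := by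
        rw [List.filter_cons]; simp [hy1]
      rw [hred, ht]; simp [chainStops, h]
    · have hy1 : ¬ (prev + 1 ∈ M) := fun hc => h (hflag.mp hc)
      have hred : (prev :: y :: t).filter (fun s => !decide ((s + 1) ∈ M))
          = prev :: (y :: t).filter (fun s => !decide ((s + 1) ∈ M)) := by
        rw [List.filter_cons]; simp [hy1]
      rw [hred, ht]; simp [chainStops, h]

-- ===== VERDICT (by name: the statement is the Claim_ definition above) =====
theorem describe_choices_help_spec : Claim_equal_describe_choices_help := by
  intro sides n ss _ hpre
  unfold Spec_describe_choices_help
  by_cases hn : n = 1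
  · simp only [describe_choices_help, describe_choices_help_alt, if_pos hn]
  · simp only [describe_choices_help, describe_choices_help_alt, if_neg hn]
    -- facts about vals = sorted(set(ss))
    have hvp := PySem.List.sorted_ofList_pairwise_lt ss
    have hvm : ∀ z : Int, z ∈ PySem.List.sorted (PySem.Set.ofList ss) (fun x => x) false ↔ z ∈ ss := by
      intro z
      rw [PySem.List.mem_sorted]
      exact PySem.Set.mem_ofList _ _
    obtain ⟨x, t, hv⟩ : ∃ x t, PySem.List.sorted (PySem.Set.ofList ss) (fun x => x) false = x :: t := by
      cases hvals : PySem.List.sorted (PySem.Set.ofList ss) (fun x => x) false with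
      | nil =>
        exfalso
        cases ss with
        | nil => exact hpre rfl
        | cons a l =>
          have := (hvm a).mpr (by simp)
          rw [hvals] at this
          exact absurd this (List.not_mem_nil)
      | cons x t => exact ⟨x, t, rfl⟩
    rw [hv] at hvp hvm
    have hxt : ∀ z ∈ t, x < z := fun z hz => (List.pairwise_cons.mp hvp).1 z hz
    have hxmin : ∀ z ∈ ss, x ≤ z := by
      intro z hz
      have := (hvm z).mpr hz
      rcases List.mem_cons.mp this with h | h
      · omega
      · exact le_of_lt (hxt z h)
    have hxss : x ∈ ss := (hvm x).mp (by simp)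
    have hM : ∀ z : Int, x ≤ z → (z ∈ ss ↔ z ∈ x :: t) := fun z _ => (hvm z).symm
    -- the filtered starts / stops of vals
    have hfs : (x :: t).filter (fun s => !decide ((s - 1) ∈ ss)) = x :: chainStarts x t := by
      have hxflag : ¬ (x - 1 ∈ ss) := fun hc => absurd (hxmin _ hc) (by omega)
      rw [List.filter_cons]
      simp only [hxflag, decide_false, Bool.not_false]
      exact congrArg (x :: ·)
        (filter_start_eq_chainStarts ss t x (List.pairwise_cons.mp hvp).2 hxt hM)
    have hfp : (x :: t).filter (fun s => !decide ((s + 1) ∈ ss)) = chainStops x t :=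
      filter_stop_eq_chainStops ss t x (List.pairwise_cons.mp hvp).2 hxt hM
    -- min / max of ss
    obtain ⟨m, hm⟩ : ∃ m, PySem.List.min? ss (fun x => x) = some m := by
      cases h : PySem.List.min? ss (fun x => x) with
      | none => exact absurd ((PySem.List.min?_eq_none_iff ss _).mp h) hpre
      | some m => exact ⟨m, rfl⟩
    obtain ⟨mx, hmx⟩ : ∃ mx, PySem.List.max? ss (fun x => x) = some mx := by
      cases h : PySem.List.max? ss (fun x => x) with
      | none => exact absurd ((PySem.List.max?_eq_none_iff ss _).mp h) hpre
      | some mx => exact ⟨mx, rfl⟩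
    have hmss : m ∈ ss := PySem.List.min?_mem hm
    have hmmin : ∀ y ∈ ss, m ≤ y := PySem.List.min?_isMin hm
    have hmxss : mx ∈ ss := PySem.List.max?_mem hmx
    have hmxmax : ∀ y ∈ ss, y ≤ mx := PySem.List.max?_isMax hmx
    -- sorted(start) and sorted(stop) as filters of vals
    have hnodv : (x :: t).Nodup := hvp.imp (fun h => ne_of_lt h)
    have hstart : PySem.List.sorted
        (PySem.Set.union (PySem.Set.ofList [(PySem.List.min? ss (fun x => x)).getD 0])
          (PySem.Set.ofList (ss.filter (fun s => !decide ((s - 1) ∈ ss))))) (fun x => x) false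
        = (x :: t).filter (fun s => !decide ((s - 1) ∈ ss)) := by
      apply PySem.List.sorted_eq_of_perm_of_pairwise_lt
      · rw [List.perm_ext_iff_of_nodup (hnodv.filter _)
          (PySem.Set.nodup_union _ _ (PySem.Set.nodup_ofList _))]
        intro a
        rw [List.mem_filter, PySem.Set.mem_union, PySem.Set.mem_ofList, PySem.Set.mem_ofList,
          List.mem_filter, hm]
        simp only [List.mem_singleton, Option.getD_some, hvm a, Bool.not_eq_eq_eq_not,
          Bool.not_true, decide_eq_false_iff_not]
        constructor
        · intro ⟨h1, h2⟩; exact Or.inr ⟨h1, h2⟩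
        · intro h
          rcases h with h | ⟨h1, h2⟩
          · subst h
            exact ⟨hmss, fun hc => absurd (hmmin _ hc) (by omega)⟩
          · exact ⟨h1, h2⟩
      · exact hvp.filter _
    have hstop : PySem.List.sorted
        (PySem.Set.union (PySem.Set.ofList [(PySem.List.max? ss (fun x => x)).getD 0])
          (PySem.Set.ofList (ss.filter (fun s => !decide ((s + 1) ∈ ss))))) (fun x => x) false
        = (x :: t).filter (fun s => !decide ((s + 1) ∈ ss)) := by
      apply PySem.List.sorted_eq_of_perm_of_pairwise_lt
      · rw [List.perm_ext_iff_of_nodup (hnodv.filter _)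
          (PySem.Set.nodup_union _ _ (PySem.Set.nodup_ofList _))]
        intro a
        rw [List.mem_filter, PySem.Set.mem_union, PySem.Set.mem_ofList, PySem.Set.mem_ofList,
          List.mem_filter, hmx]
        simp only [List.mem_singleton, Option.getD_some, hvm a, Bool.not_eq_eq_eq_not,
          Bool.not_true, decide_eq_false_iff_not]
        constructor
        · intro ⟨h1, h2⟩; exact Or.inr ⟨h1, h2⟩
        · intro h
          rcases h with h | ⟨h1, h2⟩
          · subst h
            exact ⟨hmxss, fun hc => absurd (hmxmax _ hc) (by omega)⟩
          · exact ⟨h1, h2⟩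
      · exact hvp.filter _
    rw [hv, hstart, hstop, hfs, hfp, zip_chain_eq_runsFrom, pvRuns_cons,
      PySem.List.foldl_append_singleton_eq_map]
    rfl
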